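-- pv_equiv track=rewrite | github.com/igorlix/UPAE_NSGA-II | algoritmo/upae_nsga2.py | can_fully_allocate
-- ===== SOURCE A (Python) =====
-- from collections import defaultdict
--
-- def can_fully_allocate(patients, slots):
--     """
--     Verifica se, POR ESPECIALIDADE, há vaga suficiente para todos os pacientes.
--     Se para alguma especialidade #slots < #pacientes, retorna False.
--     """
--     pats_per_spec = defaultdict(int)
--     slots_per_spec = defaultdict(int)
--
--     for p in patients:
--         pats_per_spec[p['specialty']] += 1
--     for s in slots:
--         slots_per_spec[s['specialty']] += 1
--
--     for spec, n_pat in pats_per_spec.items():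
--         if slots_per_spec.get(spec, 0) < n_pat:
--             return False
--     return True
-- ===== SOURCE B (Python) =====
-- def can_fully_allocate(patients, slots):
--     """
--     Verifica se, POR ESPECIALIDADE, há vaga suficiente para todos os pacientes.
--     Se para alguma especialidade #slots < #pacientes, retorna False.
--     """
--     need = sorted(p['specialty'] for p in patients)
--     have = sorted(s['specialty'] for s in slots)
--     i = 0
--     for spec in need:
--         while i < len(have) and have[i] < spec:
--             i += 1
--         if i == len(have) or have[i] != spec:
--             return False
--         i += 1
--     return True
-- ===== Notes on version B (the rewrite author's own statement) =====
-- stated objective: alternative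
-- what changed: Replaces A's per-specialty hash histograms and keyed comparison with sort-then-scan: sort the patient and slot specialty lists and run a two-pointer greedy match checking multiset containment.
import Mathlib
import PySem

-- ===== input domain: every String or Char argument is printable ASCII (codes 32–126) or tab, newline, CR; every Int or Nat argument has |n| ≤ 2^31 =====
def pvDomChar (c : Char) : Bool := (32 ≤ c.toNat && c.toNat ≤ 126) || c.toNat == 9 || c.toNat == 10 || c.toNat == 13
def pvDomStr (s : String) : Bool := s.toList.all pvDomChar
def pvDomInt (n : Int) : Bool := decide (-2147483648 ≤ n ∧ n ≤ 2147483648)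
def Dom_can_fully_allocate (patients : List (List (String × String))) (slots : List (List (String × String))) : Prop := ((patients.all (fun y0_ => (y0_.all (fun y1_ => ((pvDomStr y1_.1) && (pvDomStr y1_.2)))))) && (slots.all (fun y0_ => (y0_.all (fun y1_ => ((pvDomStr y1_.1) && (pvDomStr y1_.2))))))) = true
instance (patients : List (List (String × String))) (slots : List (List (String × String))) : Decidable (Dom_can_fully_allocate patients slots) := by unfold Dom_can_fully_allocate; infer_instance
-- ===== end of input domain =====

-- B sorts the two specialty lists and checks multiset containment with a two-pointer greedy
-- match, instead of A's two hash histograms compared key by key (alternative, not faster).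

-- ===== PORT A =====
-- p['specialty'] on the dict p (assoc list); Pre_ guarantees the key is present, so the getD "" default is never used
def pvSpec (p : List (String × String)) : String :=
  ((PySem.Dict.ofList p).get? "specialty").getD ""

def can_fully_allocate (patients : List (List (String × String))) (slots : List (List (String × String))) : Bool :=
  let pats := patients.foldl (fun d p => d.modify (pvSpec p) 0 (· + 1)) (PySem.Dict.empty : PySem.Dict String Int)
  let sl := slots.foldl (fun d s => d.modify (pvSpec s) 0 (· + 1)) (PySem.Dict.empty : PySem.Dict String Int)
  -- early-return loop over pats.items as .all
  pats.items.all (fun kv => !(decide (sl.getD kv.1 0 < kv.2)))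

-- ===== PORT B =====
-- the for/while two-pointer loop of Source B as the obvious structural recursion on (need, remaining have)
def pvMatch : List String → List String → Bool
  | [], _ => true
  | _ :: _, [] => false            -- i == len(have)
  | spec :: rest, h :: hs =>
      if h < spec then pvMatch (spec :: rest) hs          -- while have[i] < spec: i += 1
      else if h ≠ spec then false                          -- have[i] != spec
      else pvMatch rest hs                                 -- i += 1, next spec
termination_by need hv => need.length + hv.length

def can_fully_allocate_alt (patients : List (List (String × String))) (slots : List (List (String × String))) : Bool :=
  let need := PySem.List.sorted (patients.map pvSpec) (fun x => x) false
  let hv := PySem.List.sorted (slots.map pvSpec) (fun x => x) false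
  pvMatch need hv

-- ===== PRECONDITION & SPEC =====
-- Pre_ excludes exactly the inputs where Python raises KeyError: a patient or slot dict without the key 'specialty'.
def Pre_can_fully_allocate (patients : List (List (String × String))) (slots : List (List (String × String))) : Prop :=
  (patients.all (fun p => (PySem.Dict.ofList p).contains "specialty")
    && slots.all (fun s => (PySem.Dict.ofList s).contains "specialty")) = true
instance (patients : List (List (String × String))) (slots : List (List (String × String))) : Decidable (Pre_can_fully_allocate patients slots) := by unfold Pre_can_fully_allocate; infer_instance

def pvWitness_can_fully_allocate : (List (List (String × String))) × (List (List (String × String))) :=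
  ([[("specialty", "cardio")]], [[("specialty", "cardio")], [("specialty", "neuro")]])

def Spec_can_fully_allocate (patients : List (List (String × String))) (slots : List (List (String × String))) (out : Bool) : Prop := out = can_fully_allocate_alt patients slots
instance (patients : List (List (String × String))) (slots : List (List (String × String))) (out : Bool) : Decidable (Spec_can_fully_allocate patients slots out) := by unfold Spec_can_fully_allocate; infer_instance

-- ===== CLAIM (what is proved, stated in full; the proofs are below) =====
def Claim_equal_can_fully_allocate : Prop := ∀ (patients : List (List (String × String))) (slots : List (List (String × String))), Dom_can_fully_allocate patients slots → Pre_can_fully_allocate patients slots → Spec_can_fully_allocate patients slots (can_fully_allocate patients slots)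

-- ===== LEMMAS AND PROOFS =====

-- the two-pointer match on sorted lists decides multiset containment (count-wise ≤)
theorem pvMatch_iff (need hv : List String) (hn : need.Pairwise (· ≤ ·)) (hh : hv.Pairwise (· ≤ ·)) :
    pvMatch need hv = true ↔ ∀ x, need.count x ≤ hv.count x := by
  fun_induction pvMatch need hv with
  | case1 hv => simp
  | case2 spec rest =>
      simp only [Bool.false_eq_true, false_iff, not_forall, not_le]
      refine ⟨spec, ?_⟩
      simp [List.count_cons_self]
  | case3 spec rest h hs hlt ih =>
      rw [ih hn (List.Pairwise.of_cons hh)]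
      constructor
      · intro hc x
        calc (spec :: rest).count x ≤ hs.count x := hc x
          _ ≤ (h :: hs).count x := by simp [List.count_cons]
      · intro hc x
        by_cases hx : x ∈ spec :: rest
        · have hsx : spec ≤ x := by
            rcases List.mem_cons.mp hx with rfl | hx
            · exact le_refl _
            · exact (List.pairwise_cons.mp hn).1 x hx
          have hxh : x ≠ h := fun e => absurd (lt_of_lt_of_le hlt hsx) (by rw [e]; exact lt_irrefl _)
          have := hc x
          rwa [List.count_cons_of_ne (Ne.symm hxh)] at this
        · simp [List.count_eq_zero.mpr hx]
  | case4 spec rest h hs hlt hne =>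
      have hsh : spec < h := lt_of_le_of_ne (le_of_not_gt hlt) (Ne.symm hne)
      simp only [Bool.false_eq_true, false_iff, not_forall, not_le]
      refine ⟨spec, ?_⟩
      have hnot : spec ∉ h :: hs := by
        intro hm
        rcases List.mem_cons.mp hm with rfl | hm
        · exact absurd hsh (lt_irrefl _)
        · have := (List.pairwise_cons.mp hh).1 spec hm
          exact absurd (lt_of_lt_of_le hsh this) (lt_irrefl _)
      rw [List.count_eq_zero.mpr hnot]
      simp [List.count_cons_self]
  | case5 spec rest h hs hlt hne ih =>
      have heq : h = spec := not_not.mp hne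
      subst heq
      rw [ih (List.Pairwise.of_cons hn) (List.Pairwise.of_cons hh)]
      constructor
      · intro hc x
        have := hc x
        simp only [List.count_cons] at this ⊢
        split_ifs at this ⊢ <;> omega
      · intro hc x
        have := hc x
        simp only [List.count_cons] at this ⊢
        split_ifs at this ⊢ <;> omega

-- A's histogram check is count-wise ≤
theorem can_fully_allocate_eq_count (patients slots : List (List (String × String))) :
    can_fully_allocate patients slots = true ↔
      ∀ x, (patients.map pvSpec).count x ≤ (slots.map pvSpec).count x := by
  unfold can_fully_allocate
  set P := patients.map pvSpec with hP
  set S := slots.map pvSpec with hS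
  have hfA1 : patients.foldl (fun d p => d.modify (pvSpec p) 0 (· + 1)) (PySem.Dict.empty : PySem.Dict String Int)
      = PySem.Dict.counter P := by
    rw [PySem.Dict.counter_eq_foldl, hP, List.foldl_map]
  have hfA2 : slots.foldl (fun d s => d.modify (pvSpec s) 0 (· + 1)) (PySem.Dict.empty : PySem.Dict String Int)
      = PySem.Dict.counter S := by
    rw [PySem.Dict.counter_eq_foldl, hS, List.foldl_map]
  simp only [hfA1, hfA2]
  simp only [List.all_eq_true, PySem.Dict.items_counter, List.mem_map, Bool.not_eq_eq_eq_not,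
    Bool.not_true, decide_eq_false_iff_not, not_lt]
  constructor
  · intro h x
    by_cases hx : x ∈ P
    · have h2 := h (x, (P.count x : Int)) ⟨x, (PySem.Set.mem_ofList _ _).mpr hx, rfl⟩
      rw [PySem.Dict.getD_counter] at h2
      simpa using h2
    · simp [List.count_eq_zero.mpr hx]
  · rintro h kv ⟨a, haP, rfl⟩
    rw [PySem.Dict.getD_counter]
    simpa using h a

theorem can_fully_allocate_spec_aux (patients slots : List (List (String × String))) :
    can_fully_allocate patients slots = can_fully_allocate_alt patients slots := by
  unfold can_fully_allocate_alt
  set P := patients.map pvSpec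
  set S := slots.map pvSpec
  rw [Bool.eq_iff_iff, can_fully_allocate_eq_count,
    pvMatch_iff _ _ (PySem.List.sorted_pairwise P (fun x => x) )
      (PySem.List.sorted_pairwise S (fun x => x))]
  constructor <;> intro h x
  · rw [(PySem.List.sorted_perm P (fun x => x) false).count_eq,
      (PySem.List.sorted_perm S (fun x => x) false).count_eq]
    exact h x
  · have := h x
    rwa [(PySem.List.sorted_perm P (fun x => x) false).count_eq,
      (PySem.List.sorted_perm S (fun x => x) false).count_eq] at this

-- ===== VERDICT (by name: the statement is the Claim_ definition above) =====
theorem can_fully_allocate_spec : Claim_equal_can_fully_allocate := by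
  intro patients slots _ _
  exact can_fully_allocate_spec_aux patients slots
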